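-- pv_equiv track=rewrite | github.com/UO263541/CSD | Factorizacion/testCribaCuadratica.py | crearFila
-- ===== SOURCE A (Python) =====
-- def crearFila(neg,factbase, base):
--     #Crea las filas teniendo en cuenta la base y añadiendo el -1 previamente si fuese necesario
--     matriz=[]
--     matriz.append(neg)
--     num= len(base)
--     for i in range (0,num):
--         index = 0
--
--
--         for j in factbase:
--             if base[i]==j:
--                 index+=1
--         matriz.append(index)
--
--     return matriz
-- ===== SOURCE B (Python) =====
-- def crearFila(neg, factbase, base):
--     # Inverted index: base value -> list of all its positions in base.
--     positions = {}
--     for idx, b in enumerate(base):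
--         positions.setdefault(b, []).append(idx)
--     # One scatter pass over factbase into a positional counts array.
--     counts = [0] * len(base)
--     for j in factbase:
--         for idx in positions.get(j, []):
--             counts[idx] += 1
--     return [neg] + counts
-- ===== Notes on version B (the rewrite author's own statement) =====
-- stated objective: alternative
-- what changed: Replaces A's per-base-position rescan of factbase with an inverted index (base value -> list of positions) and one scatter pass over factbase that increments a positional counts array.
import Mathlib
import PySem

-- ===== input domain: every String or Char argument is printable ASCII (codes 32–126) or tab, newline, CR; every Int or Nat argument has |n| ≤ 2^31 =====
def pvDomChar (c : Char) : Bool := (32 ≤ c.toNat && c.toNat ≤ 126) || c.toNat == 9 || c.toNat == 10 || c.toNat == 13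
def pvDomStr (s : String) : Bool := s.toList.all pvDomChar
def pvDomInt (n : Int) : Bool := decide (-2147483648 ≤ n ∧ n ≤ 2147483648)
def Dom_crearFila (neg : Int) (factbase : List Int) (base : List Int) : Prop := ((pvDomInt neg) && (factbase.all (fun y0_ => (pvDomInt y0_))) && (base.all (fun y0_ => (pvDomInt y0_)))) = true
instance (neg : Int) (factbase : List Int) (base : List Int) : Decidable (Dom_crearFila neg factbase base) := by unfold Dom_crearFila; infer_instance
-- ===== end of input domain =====

-- B replaces A's per-base-position rescan of factbase with an inverted index (value -> positions)
-- and one scatter pass over factbase into a positional counts array (objective: alternative).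

-- ===== PORT A =====
-- literal port of A: for each i in range(len(base)), rescan factbase counting matches, append
def crearFila (neg : Int) (factbase : List Int) (base : List Int) : List Int :=
  (PySem.List.pyRange 0 base.length 1).foldl
    (fun matriz i =>
      matriz ++ [factbase.foldl
        (fun index j => if PySem.List.pyGetD base i 0 == j then index + 1 else index) (0 : Int)])
    [neg]

-- ===== PORT B =====
-- port of B: inverted index base value -> positions, then one scatter pass over factbase
-- (Python's positions.setdefault(b, []).append(idx) is, value-for-value, d[b] = d.get(b, []) + [idx] = Dict.modify)
def crearFila_alt (neg : Int) (factbase : List Int) (base : List Int) : List Int :=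
  let positions := (PySem.List.enumerate base).foldl
      (fun d p => d.modify p.2 [] (fun l => l ++ [p.1]))
      (PySem.Dict.empty : PySem.Dict Int (List Int))
  let counts := factbase.foldl
      (fun cnts j => (positions.getD j []).foldl
          (fun c idx => PySem.List.pySetD c idx (PySem.List.pyGetD c idx 0 + 1)) cnts)
      (List.replicate base.length (0 : Int))
  neg :: counts

-- ===== PRECONDITION & SPEC =====
def Spec_crearFila (neg : Int) (factbase : List Int) (base : List Int) (out : List Int) : Prop := out = crearFila_alt neg factbase base
instance (neg : Int) (factbase : List Int) (base : List Int) (out : List Int) : Decidable (Spec_crearFila neg factbase base out) := by unfold Spec_crearFila; infer_instance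

-- ===== CLAIM (what is proved, stated in full; the proofs are below) =====
def Claim_equal_crearFila : Prop := ∀ (neg : Int) (factbase : List Int) (base : List Int), Dom_crearFila neg factbase base → Spec_crearFila neg factbase base (crearFila neg factbase base)

-- ===== LEMMAS AND PROOFS =====

-- A's result: neg followed by the per-base-element counts
theorem crearFila_eq_map (neg : Int) (factbase : List Int) (base : List Int) :
    crearFila neg factbase base = neg :: base.map (fun b => (factbase.count b : Int)) := by
  unfold crearFila
  rw [PySem.List.foldl_append_singleton_eq_map]
  have hb : ∀ (bi : Int), factbase.foldl
      (fun index j => if bi == j then index + 1 else index) (0 : Int) = (factbase.count bi : Int) := by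
    intro bi
    rw [PySem.List.foldl_congr_mem factbase _ (fun index j => if j == bi then index + 1 else index) 0
        (by intro acc x _; simp [BEq.comm]),
      PySem.List.foldl_beq_add_one]
    ring
  simp only [hb]
  have hmap : (PySem.List.pyRange 0 (base.length : Int) 1).map
      (fun i => ((factbase.count (PySem.List.pyGetD base i 0) : Int)))
      = base.map (fun b => ((factbase.count b : Int))) := by
    rw [show (fun i => ((factbase.count (PySem.List.pyGetD base i 0) : Int)))
        = (fun b => ((factbase.count b : Int))) ∘ (fun i => PySem.List.pyGetD base i 0) from rfl,
      ← List.map_map, PySem.List.map_pyGetD_pyRange_zero']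
  rw [hmap]; simp

theorem pos_getD (base : List Int) (v : Int) :
    ((PySem.List.enumerate base).foldl (fun d p => d.modify p.2 [] (fun l => l ++ [p.1]))
        (PySem.Dict.empty : PySem.Dict Int (List Int))).getD v []
      = ((PySem.List.enumerate base).filter (fun p => p.2 == v)).map (fun p => p.1) := by
  have h : (PySem.List.enumerate base).foldl (fun d p => d.modify p.2 [] (fun l => l ++ [p.1]))
        (PySem.Dict.empty : PySem.Dict Int (List Int))
      = ((PySem.List.enumerate base).map Prod.swap).foldl
        (fun d p => d.modify p.1 [] (fun l => l ++ [p.2]))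
        (PySem.Dict.empty : PySem.Dict Int (List Int)) := by
    rw [List.foldl_map]; rfl
  rw [h, PySem.Dict.getD_foldl_modify_append]
  simp [List.filter_map, Function.comp_def]

theorem mem_pos (base : List Int) (v : Int) (k : Nat) :
    ((k : Int) ∈ ((PySem.List.enumerate base).filter (fun p => p.2 == v)).map (fun p => p.1))
      ↔ ∃ h : k < base.length, base[k] = v := by
  simp only [List.mem_map, List.mem_filter, PySem.List.mem_enumerate_iff]
  constructor
  · rintro ⟨p, ⟨⟨n, hn, rfl⟩, hv⟩, hk⟩
    simp at hk hv
    obtain rfl : n = k := by exact_mod_cast hk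
    exact ⟨hn, hv⟩
  · rintro ⟨h, hv⟩
    exact ⟨((k : Int), base[k]), ⟨⟨k, h, by simp⟩, by simp [hv]⟩, rfl⟩

theorem pos_bounds (base : List Int) (v : Int) :
    ∀ x ∈ ((PySem.List.enumerate base).filter (fun p => p.2 == v)).map (fun p => p.1),
      0 ≤ x ∧ x.toNat < base.length := by
  intro x hx
  simp only [List.mem_map, List.mem_filter, PySem.List.mem_enumerate_iff] at hx
  obtain ⟨p, ⟨⟨n, hn, rfl⟩, _⟩, hk⟩ := hx
  simp at hk
  omega

theorem pos_sorted (base : List Int) (v : Int) :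
    (((PySem.List.enumerate base).filter (fun p => p.2 == v)).map (fun p => p.1)).Pairwise (· < ·) := by
  exact List.Pairwise.map _ (fun a b h => h)
    ((PySem.List.pairwise_lt_enumerate base 0).filter _)

theorem scatter_length (ps : List Int) : ∀ (c : List Int),
    (ps.foldl (fun c idx => PySem.List.pySetD c idx (PySem.List.pyGetD c idx 0 + 1)) c).length
      = c.length := by
  induction ps with
  | nil => intro c; rfl
  | cons i rest ih =>
    intro c
    simp only [List.foldl_cons, ih, PySem.List.length_pySetD]

theorem scatter_getD (ps : List Int) : ∀ (c : List Int) (k : Nat),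
    ps.Pairwise (· < ·) → (∀ x ∈ ps, 0 ≤ x ∧ x.toNat < c.length) → k < c.length →
    (ps.foldl (fun c idx => PySem.List.pySetD c idx (PySem.List.pyGetD c idx 0 + 1)) c).getD k 0
      = c.getD k 0 + (if (k : Int) ∈ ps then 1 else 0) := by
  induction ps with
  | nil => intro c k _ _ _; simp
  | cons i rest ih =>
    intro c k hpw hbd hk
    have hi := hbd i (by simp)
    have hset : PySem.List.pySetD c i (PySem.List.pyGetD c i 0 + 1)
        = c.set i.toNat (c.getD i.toNat 0 + 1) := by
      rw [PySem.List.pySetD_of_nonneg _ _ hi.1,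
        PySem.List.pyGetD_eq_getElem (h0 := hi.1) (h1 := by omega)]
      rw [List.getD_eq_getElem?_getD, List.getElem?_eq_getElem hi.2]
      rfl
    simp only [List.foldl_cons, hset]
    rw [ih _ k hpw.of_cons
      (by intro x hx; have := hbd x (by simp [hx]); simpa using this)
      (by simpa using hk)]
    by_cases hik : (k : Int) = i
    · have hkn : i.toNat = k := by omega
      have hnotr : (k : Int) ∉ rest := by
        intro hmem
        have := (List.pairwise_cons.mp hpw).1 _ hmem
        omega
      rw [List.getD_eq_getElem?_getD, hkn, List.getElem?_set_self']
      rw [List.getElem?_eq_getElem hk]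
      simp [← hik, List.getD_eq_getElem?_getD, List.getElem?_eq_getElem hk]
      exact hnotr
    · have hkn : i.toNat ≠ k := by omega
      have : (k : Int) ∈ i :: rest ↔ (k : Int) ∈ rest := by simp [hik]
      rw [List.getD_eq_getElem?_getD, List.getElem?_set_ne hkn]
      simp [this, List.getD_eq_getElem?_getD]

-- the outer scatter loop preserves the counts length
theorem outer_length (fb : List Int) (g : Int → List Int) : ∀ (cnts : List Int),
    (fb.foldl (fun cnts j => (g j).foldl
        (fun c idx => PySem.List.pySetD c idx (PySem.List.pyGetD c idx 0 + 1)) cnts) cnts).length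
      = cnts.length := by
  induction fb with
  | nil => intro cnts; rfl
  | cons j rest ih => intro cnts; simp only [List.foldl_cons, ih, scatter_length]

-- the outer scatter loop counts, at position k, the factbase elements whose position list contains k
theorem outer_getD (base : List Int) (fb : List Int) : ∀ (cnts : List Int) (k : Nat),
    cnts.length = base.length → k < base.length →
    (fb.foldl (fun cnts j =>
        (((PySem.List.enumerate base).filter (fun p => p.2 == j)).map (fun p => p.1)).foldl
          (fun c idx => PySem.List.pySetD c idx (PySem.List.pyGetD c idx 0 + 1)) cnts) cnts).getD k 0
      = cnts.getD k 0
        + (fb.countP (fun j => decide ((k : Int) ∈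
            ((PySem.List.enumerate base).filter (fun p => p.2 == j)).map (fun p => p.1))) : Int) := by
  induction fb with
  | nil => intro cnts k _ _; simp
  | cons j rest ih =>
    intro cnts k hlen hk
    simp only [List.foldl_cons]
    rw [ih _ k (by rw [scatter_length, hlen]) hk,
      scatter_getD _ _ k (pos_sorted base j)
        (by intro x hx; have := pos_bounds base j x hx; omega) (by omega),
      List.countP_cons]
    by_cases hm : (k : Int) ∈ ((PySem.List.enumerate base).filter (fun p => p.2 == j)).map (fun p => p.1)
    · simp [hm]; ring
    · simp [hm]

-- ===== VERDICT (by name: the statement is the Claim_ definition above) =====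
theorem crearFila_spec : Claim_equal_crearFila := by
  intro neg factbase base _
  unfold Spec_crearFila
  rw [crearFila_eq_map]
  unfold crearFila_alt
  simp only [pos_getD]
  congr 1
  apply List.ext_getElem
  · rw [outer_length]; simp
  · intro k hk1 hk2
    have hk : k < base.length := by simpa using hk1
    have hfinal := outer_getD base factbase (List.replicate base.length (0 : Int)) k
      (by simp) hk
    rw [List.getElem_map]
    rw [show (factbase.foldl (fun cnts j =>
        (((PySem.List.enumerate base).filter (fun p => p.2 == j)).map (fun p => p.1)).foldl
          (fun c idx => PySem.List.pySetD c idx (PySem.List.pyGetD c idx 0 + 1)) cnts)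
        (List.replicate base.length (0 : Int)))[k] =
      (factbase.foldl (fun cnts j =>
        (((PySem.List.enumerate base).filter (fun p => p.2 == j)).map (fun p => p.1)).foldl
          (fun c idx => PySem.List.pySetD c idx (PySem.List.pyGetD c idx 0 + 1)) cnts)
        (List.replicate base.length (0 : Int))).getD k 0 from
      (List.getD_eq_getElem _ _ hk2).symm, hfinal]
    have hcnt : factbase.countP (fun j => decide ((k : Int) ∈
        ((PySem.List.enumerate base).filter (fun p => p.2 == j)).map (fun p => p.1)))
        = factbase.count base[k] := by
      rw [List.count_eq_countP]
      apply List.countP_congr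
      intro x _
      simp only [mem_pos base x k, hk, exists_true_left, beq_iff_eq]
      exact ⟨fun h => (of_decide_eq_true h).symm, fun h => decide_eq_true h.symm⟩
    rw [hcnt]
    simp [List.getD_eq_getElem?_getD, hk]
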